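-- pv_equiv track=rewrite | github.com/Carricossauro/lcc | Treino 4/uniao.py | search
-- ===== SOURCE A (Python) =====
-- def complete(sets, ls, un, x):
--     return x == len(ls)
--
-- def valid(sets, ls, un, x):
--     resp = set()
--     for y in ls:
--         resp = resp.union(sets[y])
--     return un == resp
--
-- def extensions(sets, ls, un, x):
--     lista = []
--     for i in range(len(sets)):
--         if i not in ls:
--             lista.append(i)
--     return lista
--
-- def search(sets, ls, un, x):
--     if complete(sets, ls, un, x):
--         return valid(sets, ls, un, x)
--
--     for k in extensions(sets, ls, un, x):
--         ls.append(k)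
--         if search(sets, ls, un, x):
--             return True
--         ls.pop()
--
--     return False
-- ===== SOURCE B (Python) =====
-- def search(sets, ls, un, x):
--     n = len(sets)
--     free = [i for i in range(n) if i not in ls]
--     need = x - len(ls)
--     if need < 0 or need > len(free):
--         return False
--     target = set(un)
--     base = set()
--     for y in ls:
--         base = base | set(sets[y])
--
--     def go(rem, k, acc):
--         if k == 0:
--             return acc == target
--         if len(rem) < k:
--             return False
--         return go(rem[1:], k - 1, acc | set(sets[rem[0]])) or go(rem[1:], k, acc)
--
--     return go(free, need, base)
-- ===== Notes on version B (the rewrite author's own statement) =====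
-- stated objective: faster
-- what changed: Replaces A's permutation DFS (which appends/pops on ls, tries every ordering of the chosen indices and recomputes the whole union from scratch at each complete leaf) by a combinations search over the free indices in increasing order with an incrementally maintained union and an early infeasibility guard.
import Mathlib
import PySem

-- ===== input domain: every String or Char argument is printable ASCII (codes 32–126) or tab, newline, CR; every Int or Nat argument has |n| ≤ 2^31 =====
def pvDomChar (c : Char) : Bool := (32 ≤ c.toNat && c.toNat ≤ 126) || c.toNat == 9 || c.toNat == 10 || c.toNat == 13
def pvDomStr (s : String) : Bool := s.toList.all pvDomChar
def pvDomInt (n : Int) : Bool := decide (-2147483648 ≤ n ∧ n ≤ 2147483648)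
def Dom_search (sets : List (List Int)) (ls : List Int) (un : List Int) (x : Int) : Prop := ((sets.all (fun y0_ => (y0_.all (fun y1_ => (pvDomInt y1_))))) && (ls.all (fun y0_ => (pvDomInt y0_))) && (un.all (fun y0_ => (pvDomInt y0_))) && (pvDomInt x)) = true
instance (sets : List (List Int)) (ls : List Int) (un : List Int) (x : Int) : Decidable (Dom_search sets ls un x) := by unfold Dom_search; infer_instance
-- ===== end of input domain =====

-- B replaces A's permutation DFS (which appends/pops on `ls` and recomputes the whole union at
-- every complete leaf) by a combinations search over the free indices in increasing order with an
-- incrementally maintained union; A mutates `ls` in place (append/pop, restored on backtracking) —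
-- the equivalence proved here is about the RETURN value only.

-- ===== PORT A =====
-- complete(sets, ls, un, x)
def pvComplete (ls : List Int) (x : Int) : Bool := x == (ls.length : Int)

-- valid(sets, ls, un, x): resp = union of the sets sets[y]; `un == resp` is Python set equality.
-- sets[y] is ported with pyGetD: Pre_ excludes the inputs on which this indexing raises.
def pvValid (sets : List (List Int)) (ls : List Int) (un : List Int) : Bool :=
  let resp : PySem.Set Int :=
    ls.foldl (fun r y => PySem.Set.union r (PySem.List.pyGetD sets y [])) PySem.Set.empty
  PySem.Set.equal un resp

-- extensions(sets, ls, un, x)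
def pvExtensions (sets : List (List Int)) (ls : List Int) : List Int :=
  (List.range sets.length).foldl
    (fun acc (i : Nat) => if ((i : Int) ∉ ls) then acc ++ [(i : Int)] else acc) []

-- closed form of the extensions loop, needed for the termination measure of `search`
theorem pvExtensions_eq (sets : List (List Int)) (ls : List Int) :
    pvExtensions sets ls =
      ((List.range sets.length).filter (fun i : Nat => decide ((i : Int) ∉ ls))).map (fun i : Nat => (i : Int)) := by
  unfold pvExtensions
  have h := PySem.List.foldl_append_if (fun i : Nat => decide ((i : Int) ∉ ls))
    (fun i : Nat => (i : Int)) (List.range sets.length) []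
  simpa only [List.nil_append, decide_eq_true_eq] using h

theorem pvExtensions_mono {sets : List (List Int)} {ls : List Int} {k : Int}
    (hk : k ∈ pvExtensions sets ls) :
    (pvExtensions sets (ls ++ [k])).length < (pvExtensions sets ls).length := by
  rw [pvExtensions_eq] at hk
  rw [pvExtensions_eq, pvExtensions_eq]
  simp only [List.length_map]
  simp only [List.mem_map, List.mem_filter] at hk
  obtain ⟨j, ⟨hjr, hjl⟩, rfl⟩ := hk
  simp only [decide_eq_true_eq] at hjl
  have h1 : (List.range sets.length).filter (fun i : Nat => decide ((i : Int) ∉ ls ++ [(j : Int)])) =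
      ((List.range sets.length).filter (fun i : Nat => decide ((i : Int) ∉ ls))).filter
        (fun i : Nat => decide ((i : Int) ∉ ls ++ [(j : Int)])) := by
    rw [List.filter_filter]
    apply List.filter_congr
    intro a _
    by_cases hq : (a : Int) ∉ ls ++ [(j : Int)]
    · have hp : (a : Int) ∉ ls := fun hm => hq (by simp [List.mem_append, hm])
      simp [hq, hp]
    · simp only [hq, decide_false, Bool.false_and]
  rw [h1, List.length_filter_lt_length_iff_exists]
  exact ⟨j, by simp [List.mem_filter, hjr, hjl], by simp⟩

-- search(sets, ls, un, x): the for-loop with early `return True` is `List.any`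
def search (sets : List (List Int)) (ls : List Int) (un : List Int) (x : Int) : Bool :=
  if pvComplete ls x then pvValid sets ls un
  else
    (pvExtensions sets ls).attach.any (fun k => search sets (ls ++ [k.1]) un x)
termination_by (pvExtensions sets ls).length
decreasing_by exact pvExtensions_mono k.2

-- ===== PORT B =====
-- go(rem, k, acc): combinations of k elements of rem, union maintained incrementally
def pvGo (sets : List (List Int)) (target : PySem.Set Int) (rem : List Int) (k : Int)
    (acc : PySem.Set Int) : Bool :=
  if k == 0 then PySem.Set.equal acc target
  else if (rem.length : Int) < k then false
  else
    match rem with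
    | [] => false   -- totalisation guard: Python's rem[0] raises here; unreachable from search_alt (needs k < 0)
    | r :: rs =>
        pvGo sets target rs (k - 1) (PySem.Set.union acc (PySem.Set.ofList (PySem.List.pyGetD sets r []))) ||
        pvGo sets target rs k acc

def search_alt (sets : List (List Int)) (ls : List Int) (un : List Int) (x : Int) : Bool :=
  let free : List Int := ((List.range sets.length).map (fun i : Nat => (i : Int))).filter (fun i => i ∉ ls)
  let need : Int := x - ls.length
  if need < 0 || (free.length : Int) < need then false
  else
    let target : PySem.Set Int := PySem.Set.ofList un
    let base : PySem.Set Int :=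
      ls.foldl (fun r y => PySem.Set.union r (PySem.Set.ofList (PySem.List.pyGetD sets y []))) PySem.Set.empty
    pvGo sets target free need base

-- ===== PRECONDITION & SPEC =====
-- Pre_ excludes exactly the inputs on which A raises IndexError: those where the DFS can reach a
-- complete state (len(ls) ≤ x ≤ len(ls) + number of free indices) while `ls` holds an index out
-- of range for `sets`; B raises there too.
def Pre_search (sets : List (List Int)) (ls : List Int) (un : List Int) (x : Int) : Prop :=
  ¬ ((ls.length : Int) ≤ x ∧
     x ≤ (ls.length : Int) +
       ((((List.range sets.length).map (fun i : Nat => (i : Int))).filter (fun i => i ∉ ls)).length : Int) ∧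
     ∃ y ∈ ls, y < -(sets.length : Int) ∨ (sets.length : Int) ≤ y)
instance (sets : List (List Int)) (ls : List Int) (un : List Int) (x : Int) : Decidable (Pre_search sets ls un x) := by unfold Pre_search; infer_instance

def pvWitness_search : List (List Int) × List Int × List Int × Int := ([[1, 2], [3]], [], [1, 3], 2)

def Spec_search (sets : List (List Int)) (ls : List Int) (un : List Int) (x : Int) (out : Bool) : Prop := out = search_alt sets ls un x
instance (sets : List (List Int)) (ls : List Int) (un : List Int) (x : Int) (out : Bool) : Decidable (Spec_search sets ls un x out) := by unfold Spec_search; infer_instance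

-- ===== CLAIM (what is proved, stated in full; the proofs are below) =====
def Claim_equal_search : Prop := ∀ (sets : List (List Int)) (ls : List Int) (un : List Int) (x : Int), Dom_search sets ls un x → Pre_search sets ls un x → Spec_search sets ls un x (search sets ls un x)

-- ===== LEMMAS AND PROOFS =====

-- the free indices (extensions) as a filtered list, and the union of the indexed sets
def pvFree (sets : List (List Int)) (ls : List Int) : List Int :=
  ((List.range sets.length).map (fun i : Nat => (i : Int))).filter (fun i => i ∉ ls)

def pvU (sets : List (List Int)) (ys : List Int) : List Int :=
  ys.flatMap (fun y => PySem.List.pyGetD sets y [])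

-- the common characterisation both programs are proved equal to: some increasing choice of free
-- indices completes ls to length x with union un
def Qp (sets : List (List Int)) (un : List Int) (x : Int) (ls : List Int) : Prop :=
  ∃ ks, ks.Sublist (pvFree sets ls) ∧ ((ls.length : Int) + ks.length = x) ∧
    ∀ v, v ∈ un ↔ v ∈ pvU sets (ls ++ ks)

theorem pvFree_eq (sets : List (List Int)) (ls : List Int) :
    pvExtensions sets ls = pvFree sets ls := by
  rw [pvExtensions_eq]
  unfold pvFree
  rw [List.filter_map]
  rfl

theorem nodup_pvFree (sets : List (List Int)) (ls : List Int) : (pvFree sets ls).Nodup := by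
  apply List.Nodup.filter
  exact (List.nodup_range).map (fun a b h => by exact_mod_cast h)

theorem pvFree_append (sets : List (List Int)) (ls : List Int) (k : Int) :
    pvFree sets (ls ++ [k]) = (pvFree sets ls).filter (fun i => decide (i ≠ k)) := by
  unfold pvFree
  rw [List.filter_filter]
  apply List.filter_congr
  intro a _
  by_cases h1 : a ∈ ls <;> by_cases h2 : a = k <;> simp [h1, h2, List.mem_append]

theorem mem_unionFold (sets : List (List Int)) (ys : List Int) (s : PySem.Set Int) (v : Int) :
    v ∈ ys.foldl (fun r y => PySem.Set.union r (PySem.List.pyGetD sets y [])) s ↔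
      v ∈ s ∨ ∃ y ∈ ys, v ∈ PySem.List.pyGetD sets y [] := by
  induction ys generalizing s with
  | nil => simp
  | cons y ys ih =>
      simp only [List.foldl_cons, ih, PySem.Set.mem_union, List.mem_cons]
      constructor
      · rintro (⟨h | h⟩ | ⟨z, hz, hv⟩)
        · exact Or.inl h
        · exact Or.inr ⟨y, Or.inl rfl, h⟩
        · exact Or.inr ⟨z, Or.inr hz, hv⟩
      · rintro (h | ⟨z, rfl | hz, hv⟩)
        · exact Or.inl (Or.inl h)
        · exact Or.inl (Or.inr hv)
        · exact Or.inr ⟨z, hz, hv⟩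

theorem mem_unionFoldOf (sets : List (List Int)) (ys : List Int) (s : PySem.Set Int) (v : Int) :
    v ∈ ys.foldl (fun r y => PySem.Set.union r (PySem.Set.ofList (PySem.List.pyGetD sets y []))) s ↔
      v ∈ s ∨ ∃ y ∈ ys, v ∈ PySem.List.pyGetD sets y [] := by
  induction ys generalizing s with
  | nil => simp
  | cons y ys ih =>
      simp only [List.foldl_cons, ih, PySem.Set.mem_union, PySem.Set.mem_ofList, List.mem_cons]
      constructor
      · rintro (⟨h | h⟩ | ⟨z, hz, hv⟩)
        · exact Or.inl h
        · exact Or.inr ⟨y, Or.inl rfl, h⟩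
        · exact Or.inr ⟨z, Or.inr hz, hv⟩
      · rintro (h | ⟨z, rfl | hz, hv⟩)
        · exact Or.inl (Or.inl h)
        · exact Or.inl (Or.inr hv)
        · exact Or.inr ⟨z, hz, hv⟩

theorem mem_pvU (sets : List (List Int)) (ys : List Int) (v : Int) :
    v ∈ pvU sets ys ↔ ∃ y ∈ ys, v ∈ PySem.List.pyGetD sets y [] := by
  simp [pvU, List.mem_flatMap]

theorem pvU_congr (sets : List (List Int)) {ys zs : List Int}
    (h : ∀ a, a ∈ ys ↔ a ∈ zs) (v : Int) : v ∈ pvU sets ys ↔ v ∈ pvU sets zs := by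
  rw [mem_pvU, mem_pvU]
  constructor
  · rintro ⟨y, hy, hv⟩; exact ⟨y, (h y).mp hy, hv⟩
  · rintro ⟨y, hy, hv⟩; exact ⟨y, (h y).mpr hy, hv⟩

-- A's valid: set equality of un with the union over ls
theorem pvValid_iff (sets : List (List Int)) (ls : List Int) (un : List Int) :
    pvValid sets ls un = true ↔ ∀ v, v ∈ un ↔ v ∈ pvU sets ls := by
  unfold pvValid
  rw [PySem.Set.equal_iff]
  apply forall_congr'
  intro v
  rw [mem_unionFold, mem_pvU]
  simp [PySem.Set.empty]

-- membership in B's incrementally built accumulator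
theorem mem_B_acc (sets : List (List Int)) (ls ks : List Int) (v : Int) :
    (v ∈ ks.foldl (fun r y => PySem.Set.union r (PySem.Set.ofList (PySem.List.pyGetD sets y [])))
        (ls.foldl (fun r y => PySem.Set.union r (PySem.Set.ofList (PySem.List.pyGetD sets y []))) PySem.Set.empty)) ↔
      v ∈ pvU sets (ls ++ ks) := by
  rw [mem_unionFoldOf, mem_unionFoldOf, mem_pvU]
  simp only [PySem.Set.empty, List.not_mem_nil, false_or, List.mem_append]
  constructor
  · rintro (⟨y, hy, hv⟩ | ⟨y, hy, hv⟩)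
    · exact ⟨y, Or.inl hy, hv⟩
    · exact ⟨y, Or.inr hy, hv⟩
  · rintro ⟨y, hy | hy, hv⟩
    · exact Or.inl ⟨y, hy, hv⟩
    · exact Or.inr ⟨y, hy, hv⟩

-- specification of B's combination search
theorem pvGo_true_iff (sets : List (List Int)) (target : PySem.Set Int) (rem : List Int) :
    ∀ (k : Int), 0 ≤ k → ∀ (acc : PySem.Set Int),
    (pvGo sets target rem k acc = true ↔
      ∃ ks ∈ rem.sublists, (ks.length : Int) = k ∧
        PySem.Set.equal
          (ks.foldl (fun r y => PySem.Set.union r (PySem.Set.ofList (PySem.List.pyGetD sets y []))) acc) target = true) := by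
  induction rem with
  | nil =>
      intro k hk acc
      rw [pvGo]
      simp only [List.sublists_nil, List.mem_singleton]
      by_cases h0 : k = 0
      · subst h0; simp
      · simp only [beq_iff_eq, h0, if_false]
        rw [if_pos (by simpa using lt_of_le_of_ne hk (Ne.symm h0))]
        constructor
        · intro h; cases h
        · rintro ⟨ks, rfl, hlen, _⟩
          exact absurd hlen.symm (by simpa using h0)
  | cons r rs ih =>
      intro k hk acc
      rw [pvGo]
      by_cases h0 : k = 0
      · subst h0
        simp only [beq_self_eq_true, if_true]
        constructor
        · intro h
          exact ⟨[], by simp, by simp, h⟩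
        · rintro ⟨ks, _, hlen, heq⟩
          have : ks = [] := List.eq_nil_of_length_eq_zero (by exact_mod_cast hlen)
          subst this
          simpa using heq
      · simp only [beq_iff_eq, h0, if_false]
        by_cases hlt : ((r :: rs).length : Int) < k
        · rw [if_pos hlt]
          constructor
          · intro h; cases h
          · rintro ⟨ks, hks, hlen, _⟩
            have hle : ks.length ≤ (r :: rs).length :=
              (List.mem_sublists.mp hks).length_le
            omega
        · rw [if_neg hlt]
          have hk1 : (0 : Int) ≤ k - 1 := by
            have := lt_of_le_of_ne hk (Ne.symm h0); omega
          simp only [Bool.or_eq_true, ih (k - 1) hk1 _, ih k hk acc]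
          constructor
          · rintro (⟨ks, hks, hlen, heq⟩ | ⟨ks, hks, hlen, heq⟩)
            · refine ⟨r :: ks, ?_, by simp; omega, by simpa using heq⟩
              rw [List.mem_sublists] at *
              exact List.Sublist.cons₂ r hks
            · refine ⟨ks, ?_, hlen, heq⟩
              rw [List.mem_sublists] at *
              exact hks.cons r
          · rintro ⟨ks, hks, hlen, heq⟩
            rw [List.mem_sublists, List.sublist_cons_iff] at hks
            rcases hks with hks | ⟨ks', rfl, hks'⟩
            · exact Or.inr ⟨ks, List.mem_sublists.mpr hks, hlen, heq⟩
            · exact Or.inl ⟨ks', List.mem_sublists.mpr hks', by simp at hlen ⊢; omega,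
                by simpa using heq⟩

-- B computes Qp
theorem search_alt_iff_Qp (sets : List (List Int)) (ls : List Int) (un : List Int) (x : Int) :
    search_alt sets ls un x = true ↔ Qp sets un x ls := by
  unfold search_alt Qp
  rw [show ((List.range sets.length).map (fun i : Nat => (i : Int))).filter (fun i => i ∉ ls) = pvFree sets ls from rfl]
  by_cases hguard : x - (ls.length : Int) < 0 ∨ ((pvFree sets ls).length : Int) < x - ls.length
  · rw [if_pos (by simpa using hguard)]
    simp only [Bool.false_eq_true, false_iff]
    rintro ⟨ks, hks, hlen, -⟩
    have hle : ks.length ≤ (pvFree sets ls).length := hks.length_le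
    omega
  · rw [if_neg (by simpa using hguard)]
    rw [not_or] at hguard
    simp only [not_lt] at hguard
    have hz : (have target := PySem.Set.ofList un;
        have base := List.foldl
          (fun r y => PySem.Set.union r (PySem.Set.ofList (PySem.List.pyGetD sets y [])))
          PySem.Set.empty ls;
        pvGo sets target (pvFree sets ls) (x - (ls.length : Int)) base)
        = pvGo sets (PySem.Set.ofList un) (pvFree sets ls) (x - (ls.length : Int))
            (List.foldl
              (fun r y => PySem.Set.union r (PySem.Set.ofList (PySem.List.pyGetD sets y [])))
              PySem.Set.empty ls) := rfl
    rw [hz, pvGo_true_iff sets _ (pvFree sets ls) (x - ls.length) (by omega)]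
    constructor
    · rintro ⟨ks, hks, hlen, heq⟩
      refine ⟨ks, List.mem_sublists.mp hks, by omega, ?_⟩
      rw [PySem.Set.equal_iff] at heq
      intro v
      rw [← mem_B_acc sets ls ks v]
      have := heq v
      rw [PySem.Set.mem_ofList] at this
      exact this.symm
    · rintro ⟨ks, hsub, hlen, hmem⟩
      refine ⟨ks, List.mem_sublists.mpr hsub, by omega, ?_⟩
      rw [PySem.Set.equal_iff]
      intro v
      rw [PySem.Set.mem_ofList, mem_B_acc sets ls ks v]
      exact (hmem v).symm

-- A computes Qp too: strong induction on the number of free indices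
theorem search_iff_Qp (sets : List (List Int)) (un : List Int) (x : Int) :
    ∀ (n : Nat) (ls : List Int), (pvExtensions sets ls).length ≤ n →
      (search sets ls un x = true ↔ Qp sets un x ls) := by
  intro n
  induction n using Nat.strong_induction_on with
  | _ n ih =>
  intro ls hn
  rw [search]
  by_cases hc : pvComplete ls x
  · rw [if_pos hc]
    have hx : x = (ls.length : Int) := by simpa [pvComplete] using hc
    rw [pvValid_iff]
    constructor
    · intro h
      exact ⟨[], List.nil_sublist _, by simp [hx], by simpa using h⟩
    · rintro ⟨ks, hsub, hlen, hmem⟩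
      have hks : ks = [] := List.eq_nil_of_length_eq_zero (by omega)
      subst hks
      simpa using hmem
  · rw [if_neg hc]
    have hx : x ≠ (ls.length : Int) := by simpa [pvComplete] using hc
    rw [List.any_eq_true]
    constructor
    · rintro ⟨⟨k, hk⟩, -, hs⟩
      have hmono := pvExtensions_mono hk
      have hQ : Qp sets un x (ls ++ [k]) :=
        (ih _ (lt_of_lt_of_le hmono hn) _ (le_refl _)).mp hs
      obtain ⟨ks', hsub', hlen', hmem'⟩ := hQ
      have hkfree : k ∈ pvFree sets ls := by rw [← pvFree_eq]; exact hk
      have hknot : ∀ a ∈ ks', a ≠ k := by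
        intro a ha
        have := hsub'.subset ha
        rw [pvFree_append, List.mem_filter] at this
        simpa using this.2
      have hsubsetF : ∀ a ∈ k :: ks', a ∈ pvFree sets ls := by
        intro a ha
        rcases List.mem_cons.mp ha with rfl | ha'
        · exact hkfree
        · have := hsub'.subset ha'
          rw [pvFree_append, List.mem_filter] at this
          exact this.1
      have hmemfilter : ∀ a, a ∈ (pvFree sets ls).filter (fun i => decide (i ∈ k :: ks')) ↔ a ∈ k :: ks' := by
        intro a
        rw [List.mem_filter]
        simp only [decide_eq_true_eq]
        exact ⟨fun h => h.2, fun h => ⟨hsubsetF a h, h⟩⟩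
      have hnodupK : (k :: ks').Nodup := by
        rw [List.nodup_cons]
        exact ⟨fun h => hknot k h rfl, hsub'.nodup (nodup_pvFree _ _)⟩
      have hperm : List.Perm ((pvFree sets ls).filter (fun i => decide (i ∈ k :: ks'))) (k :: ks') :=
        (List.perm_ext_iff_of_nodup ((nodup_pvFree _ _).filter _) hnodupK).mpr hmemfilter
      refine ⟨(pvFree sets ls).filter (fun i => decide (i ∈ k :: ks')), List.filter_sublist, ?_, ?_⟩
      · have hlenf : ((pvFree sets ls).filter (fun i => decide (i ∈ k :: ks'))).length = ks'.length + 1 := by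
          rw [hperm.length_eq]; simp
        rw [hlenf]
        have : ((ls ++ [k]).length : Int) + ks'.length = x := hlen'
        simp only [List.length_append, List.length_cons, List.length_nil] at this
        push_cast at this ⊢
        omega
      · intro v
        rw [hmem' v]
        apply pvU_congr
        intro a
        simp only [List.mem_append]
        rw [hmemfilter a]
        simp only [List.mem_cons, List.mem_singleton, List.not_mem_nil, or_false]
        tauto
    · rintro ⟨ks, hsub, hlen, hmem⟩
      cases ks with
      | nil => exact absurd (by simpa using hlen) (Ne.symm hx)
      | cons k rest =>
        have hkfree : k ∈ pvFree sets ls := hsub.subset (List.mem_cons_self)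
        have hkext : k ∈ pvExtensions sets ls := by rw [pvFree_eq]; exact hkfree
        refine ⟨⟨k, hkext⟩, List.mem_attach _ _, ?_⟩
        have hmono := pvExtensions_mono hkext
        apply (ih _ (lt_of_lt_of_le hmono hn) _ (le_refl _)).mpr
        have hnodup : (k :: rest).Nodup := hsub.nodup (nodup_pvFree _ _)
        have hknr : k ∉ rest := (List.nodup_cons.mp hnodup).1
        refine ⟨rest, ?_, ?_, ?_⟩
        · rw [pvFree_append]
          have hrest : rest.Sublist (pvFree sets ls) := (List.sublist_cons_self k rest).trans hsub
          have h2 : (rest.filter (fun i => decide (i ≠ k))).Sublist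
              ((pvFree sets ls).filter (fun i => decide (i ≠ k))) :=
            List.Sublist.filter _ hrest
          have h3 : rest.filter (fun i => decide (i ≠ k)) = rest :=
            List.filter_eq_self.mpr (fun a ha => by
              simp only [ne_eq, decide_eq_true_eq]
              exact fun h => hknr (h ▸ ha))
          rwa [h3] at h2
        · simp only [List.length_append, List.length_cons, List.length_nil] at hlen ⊢
          push_cast at hlen ⊢
          omega
        · intro v
          rw [hmem v]
          apply pvU_congr
          intro a
          simp [List.mem_append, List.mem_cons]

-- ===== VERDICT (by name: the statement is the Claim_ definition above) =====
theorem search_spec : Claim_equal_search := by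
  intro sets ls un x _ _
  unfold Spec_search
  have hA := search_iff_Qp sets un x (pvExtensions sets ls).length ls (le_refl _)
  have hB := search_alt_iff_Qp sets ls un x
  cases ha : search sets ls un x with
  | true => exact ((hB.mpr (hA.mp ha))).symm
  | false =>
    cases hb : search_alt sets ls un x with
    | false => rfl
    | true => exact absurd (hA.mpr (hB.mp hb)) (by simp [ha])
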